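-- pv_equiv track=rewrite | github.com/ftpng/VoxStats | voxlib/rendering/utils.py | get_prestige_color
-- ===== SOURCE A (Python) =====
-- class PrestigeColorMaps:
--     """
--     Containers for prestige color mappings and 1000+ level color cycle.
--     """
--     prestige_map = {
--         900: '&5',
--         800: '&9',
--         700: '&d',
--         600: '&4',
--         500: '&3',
--         400: '&2',
--         300: '&b',
--         200: '&6',
--         100: '&f',
--         0: '&7',
--     }
--
--     prestige_1000_colors = (
--         '&c',
--         '&6',
--         '&e',
--         '&a',
--         '&b',
--         '&d',
--         '&5',
--     )
--
-- def get_star_symbol(level: int) -> str: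
--     """
--     Return the star symbol used when rendering a level badge.
--
--     Args:
--         level (int): The player's level.
--
--     Returns:
--         str: The star symbol character.
--     """
--     return '✫'
--
-- def get_prestige_color(level: int) -> str:
--     """
--     Render a level badge with prestige-based color codes.
--
--     Args:
--         level (int): The player's level. If a dict is provided, the 'level' key is used.
--
--     Raises:
--         TypeError: If level is not an int or a dict containing an int under 'level'.
--
--     Returns:
--         str: The color-coded level string, e.g., "&6[123✫]".
--     """
--     if isinstance(level, dict):
--         level = level.get('level', 0)
--
--     if not isinstance(level, int):
--         raise TypeError(
--             f"Expected an integer for level, but got {type(level)}")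
--
--     c = PrestigeColorMaps
--     level_str = f"[{level}{get_star_symbol(level)}]"
--
--     if level < 1000:
--         for threshold in sorted(c.prestige_map.keys(), reverse=True):
--             if level >= threshold:
--                 color = c.prestige_map[threshold]
--                 return ''.join([f"{color}{char}" for char in level_str])
--
--     color = c.prestige_1000_colors
--     return ''.join([f"{color[i % len(color)]}{char}" for i, char in enumerate(level_str)])
-- ===== SOURCE B (Python) =====
-- _BAND = ('&7', '&f', '&6', '&b', '&2', '&3', '&4', '&d', '&9', '&5')
-- _CYCLE = ('&c', '&6', '&e', '&a', '&b', '&d', '&5')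
--
--
-- def get_prestige_color(level: int) -> str:
--     if isinstance(level, dict):
--         level = level.get('level', 0)
--
--     if not isinstance(level, int):
--         raise TypeError(
--             f"Expected an integer for level, but got {type(level)}")
--
--     # choose a palette: a single band color for 0..999, the 7-color cycle otherwise
--     if 0 <= level < 1000:
--         palette = (_BAND[level // 100],)
--     else:
--         palette = _CYCLE
--
--     # one uniform cycling render pass for both cases
--     out = []
--     for i, char in enumerate(f"[{level}\u272b]"):
--         out.append(palette[i % len(palette)])
--         out.append(char)
--     return ''.join(out)
-- ===== Notes on version B (the rewrite author's own statement) =====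
-- stated objective: alternative
-- what changed: A scans the reverse-sorted threshold keys and has two separate join expressions (uniform color vs 7-color enumerate cycle); B first selects a palette tuple (a length-1 tuple via arithmetic bucket level//100 for 0<=level<1000, else the 7-color cycle) and then renders with one unified cycling accumulator loop palette[i % len(palette)] covering both cases.
import Mathlib
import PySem

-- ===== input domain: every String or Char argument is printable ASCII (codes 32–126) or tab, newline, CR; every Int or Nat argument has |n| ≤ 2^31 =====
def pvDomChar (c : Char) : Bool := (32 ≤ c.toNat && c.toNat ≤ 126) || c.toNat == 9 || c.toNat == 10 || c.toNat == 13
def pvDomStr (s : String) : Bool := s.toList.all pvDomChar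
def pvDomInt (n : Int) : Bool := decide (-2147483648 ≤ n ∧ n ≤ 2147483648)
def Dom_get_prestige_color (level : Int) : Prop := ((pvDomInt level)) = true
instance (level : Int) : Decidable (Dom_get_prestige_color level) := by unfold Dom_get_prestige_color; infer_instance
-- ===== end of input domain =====

-- B selects a palette (length-1 via arithmetic bucket level//100 for 0<=level<1000, else the
-- 7-color cycle) and renders both cases with ONE unified cycling accumulator loop, instead of
-- A's threshold scan plus two separate join expressions (objective: alternative).


-- ===== PORT A =====
-- prestige_map, values stored as char lists (each value is 2 ASCII chars)
def pvPrestigeMap : PySem.Dict Int (List Char) :=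
  ⟨[(900, ['&','5']), (800, ['&','9']), (700, ['&','d']), (600, ['&','4']), (500, ['&','3']),
    (400, ['&','2']), (300, ['&','b']), (200, ['&','6']), (100, ['&','f']), (0, ['&','7'])]⟩

-- prestige_1000_colors
def pvCycleA : List (List Char) :=
  [['&','c'], ['&','6'], ['&','e'], ['&','a'], ['&','b'], ['&','d'], ['&','5']]

-- the 'for threshold in sorted(..., reverse=True): if level >= threshold: return ...' loop
def pvForThresholds (level : Int) (cs : List Char) : List Int → Option (List Char)
  | [] => none
  | t :: ts =>
    if t ≤ level then
      -- ''.join([f"{color}{char}" for char in level_str]); dict hit is total here (keys come from the dict)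
      some (PySem.Chars.join [] (cs.map (fun ch => (pvPrestigeMap.getD t []) ++ [ch])))
    else pvForThresholds level cs ts

def get_prestige_color (level : Int) : String :=
  -- f"[{level}✫]" built on List Char
  let cs : List Char := ['['] ++ PySem.Int.toChars level ++ ['✫', ']']
  let r : Option (List Char) :=
    if level < 1000 then
      pvForThresholds level cs (PySem.List.sorted (PySem.Dict.keys pvPrestigeMap) id true)
    else none
  match r with
  | some s => String.mk s
  | none =>
      -- ''.join([f"{color[i % len(color)]}{char}" for i, char in enumerate(level_str)])
      String.mk (PySem.Chars.join []
        ((PySem.List.enumerate cs).map (fun p =>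
          pvCycleA.getD (PySem.Int.mod p.1 7).toNat [] ++ [p.2])))

-- ===== PORT B =====
def pvBucketColors : List (List Char) :=
  [['&','7'], ['&','f'], ['&','6'], ['&','b'], ['&','2'],
   ['&','3'], ['&','4'], ['&','d'], ['&','9'], ['&','5']]

def pvCycleB : List (List Char) :=
  [['&','c'], ['&','6'], ['&','e'], ['&','a'], ['&','b'], ['&','d'], ['&','5']]

def get_prestige_color_alt (level : Int) : String :=
  -- palette = (_BAND[level // 100],) if 0 <= level < 1000 else _CYCLE
  let palette : List (List Char) :=
    if 0 ≤ level ∧ level < 1000 then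
      [pvBucketColors.getD (PySem.Int.floordiv level 100).toNat []]
    else pvCycleB
  let cs : List Char := ['['] ++ PySem.Int.toChars level ++ ['✫', ']']
  -- for i, char in enumerate(...): out.append(palette[i % len(palette)]); out.append(char)
  let out := (PySem.List.enumerate cs).foldl
      (fun acc p => acc ++ palette.getD (PySem.Int.mod p.1 (palette.length : Int)).toNat [] ++ [p.2]) []
  String.mk out

-- ===== PRECONDITION & SPEC =====
def Spec_get_prestige_color (level : Int) (out : String) : Prop := out = get_prestige_color_alt level
instance (level : Int) (out : String) : Decidable (Spec_get_prestige_color level out) := by unfold Spec_get_prestige_color; infer_instance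

-- ===== CLAIM (what is proved, stated in full; the proofs are below) =====
def Claim_equal_get_prestige_color : Prop := ∀ (level : Int), Dom_get_prestige_color level → Spec_get_prestige_color level (get_prestige_color level)

-- ===== LEMMAS AND PROOFS =====

-- B's accumulator loop is the flatten of the per-position pieces
theorem pvFoldFlat (pal : List (List Char)) (l : List (Int × Char)) :
    l.foldl (fun acc p => acc ++ pal.getD (PySem.Int.mod p.1 (pal.length : Int)).toNat [] ++ [p.2]) []
      = (l.map (fun p => pal.getD (PySem.Int.mod p.1 (pal.length : Int)).toNat [] ++ [p.2])).flatten := by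
  have h := PySem.List.foldl_append_eq_flatMap
      (g := fun p : Int × Char => pal.getD (PySem.Int.mod p.1 (pal.length : Int)).toNat [] ++ [p.2])
      (l := l) (acc := ([] : List Char))
  simp only [List.flatMap_def] at h
  simpa using h

-- ''.join of a list of pieces is its flatten
theorem pvJoinNilFlatten (xs : List (List Char)) :
    PySem.Chars.join [] xs = xs.flatten := by
  induction xs with
  | nil => simp [PySem.Chars.join, List.intercalate]
  | cons a t ih =>
    cases t with
    | nil => simp [PySem.Chars.join, List.intercalate]
    | cons b t' =>
      rw [PySem.Chars.join_cons_cons, ih]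
      simp

-- a length-1 palette renders uniformly: the cycling pass degenerates to a plain map of the chars
theorem pvSingletonPalette (col : List Char) (cs : List Char) (k : Int) :
    ((PySem.List.enumerate cs k).map (fun p =>
        ([col] : List (List Char)).getD
          (PySem.Int.mod p.1 ((([col] : List (List Char)).length : Nat) : Int)).toNat [] ++ [p.2]))
      = cs.map (fun ch => col ++ [ch]) := by
  induction cs generalizing k with
  | nil => simp [PySem.List.enumerate]
  | cons c t ih =>
    simp only [PySem.List.enumerate, List.map_cons, ih]
    simp [PySem.Int.mod]

-- B's whole value in the band case, as the uniform join A returns there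
theorem pvBandEq (col : List Char) (cs : List Char) :
    (PySem.List.enumerate cs).foldl
        (fun acc p => acc ++ ([col] : List (List Char)).getD
          (PySem.Int.mod p.1 ((([col] : List (List Char)).length : Nat) : Int)).toNat [] ++ [p.2]) []
      = PySem.Chars.join [] (cs.map (fun ch => col ++ [ch])) := by
  rw [pvFoldFlat, pvSingletonPalette, pvJoinNilFlatten]

theorem pvThresholdsVal :
    PySem.List.sorted (PySem.Dict.keys pvPrestigeMap) id true
      = [900, 800, 700, 600, 500, 400, 300, 200, 100, 0] := by decide

theorem main_thm : ∀ (level : Int), get_prestige_color level = get_prestige_color_alt level := by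
  intro level
  by_cases hband : 0 ≤ level ∧ level < 1000
  case neg =>
    -- both take the 7-color cycle
    simp only [get_prestige_color, get_prestige_color_alt, pvThresholdsVal]
    rw [if_neg hband]
    by_cases hlt : level < 1000
    · -- level < 0: A's scan falls through to the cycle branch
      rw [if_pos hlt]
      simp only [pvForThresholds]
      repeat rw [if_neg (by omega)]
      rw [pvFoldFlat]
      exact congrArg String.mk (pvJoinNilFlatten _)
    · rw [if_neg hlt, pvFoldFlat]
      exact congrArg String.mk (pvJoinNilFlatten _)
  case pos =>
    simp only [get_prestige_color, get_prestige_color_alt, pvThresholdsVal,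
      if_pos hband, if_pos hband.2]
    simp only [pvForThresholds]
    by_cases h9 : (900:Int) ≤ level
    · rw [if_pos h9, (PySem.Int.floordiv_eq_iff_of_pos (by norm_num)).mpr (by omega : (9:Int)*100 ≤ level ∧ level < (9+1)*100)]
      exact congrArg String.mk (pvBandEq _ _).symm
    rw [if_neg h9]
    by_cases h8 : (800:Int) ≤ level
    · rw [if_pos h8, (PySem.Int.floordiv_eq_iff_of_pos (by norm_num)).mpr (by omega : (8:Int)*100 ≤ level ∧ level < (8+1)*100)]
      exact congrArg String.mk (pvBandEq _ _).symm
    rw [if_neg h8]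
    by_cases h7 : (700:Int) ≤ level
    · rw [if_pos h7, (PySem.Int.floordiv_eq_iff_of_pos (by norm_num)).mpr (by omega : (7:Int)*100 ≤ level ∧ level < (7+1)*100)]
      exact congrArg String.mk (pvBandEq _ _).symm
    rw [if_neg h7]
    by_cases h6 : (600:Int) ≤ level
    · rw [if_pos h6, (PySem.Int.floordiv_eq_iff_of_pos (by norm_num)).mpr (by omega : (6:Int)*100 ≤ level ∧ level < (6+1)*100)]
      exact congrArg String.mk (pvBandEq _ _).symm
    rw [if_neg h6]
    by_cases h5 : (500:Int) ≤ level
    · rw [if_pos h5, (PySem.Int.floordiv_eq_iff_of_pos (by norm_num)).mpr (by omega : (5:Int)*100 ≤ level ∧ level < (5+1)*100)]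
      exact congrArg String.mk (pvBandEq _ _).symm
    rw [if_neg h5]
    by_cases h4 : (400:Int) ≤ level
    · rw [if_pos h4, (PySem.Int.floordiv_eq_iff_of_pos (by norm_num)).mpr (by omega : (4:Int)*100 ≤ level ∧ level < (4+1)*100)]
      exact congrArg String.mk (pvBandEq _ _).symm
    rw [if_neg h4]
    by_cases h3 : (300:Int) ≤ level
    · rw [if_pos h3, (PySem.Int.floordiv_eq_iff_of_pos (by norm_num)).mpr (by omega : (3:Int)*100 ≤ level ∧ level < (3+1)*100)]
      exact congrArg String.mk (pvBandEq _ _).symm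
    rw [if_neg h3]
    by_cases h2 : (200:Int) ≤ level
    · rw [if_pos h2, (PySem.Int.floordiv_eq_iff_of_pos (by norm_num)).mpr (by omega : (2:Int)*100 ≤ level ∧ level < (2+1)*100)]
      exact congrArg String.mk (pvBandEq _ _).symm
    rw [if_neg h2]
    by_cases h1 : (100:Int) ≤ level
    · rw [if_pos h1, (PySem.Int.floordiv_eq_iff_of_pos (by norm_num)).mpr (by omega : (1:Int)*100 ≤ level ∧ level < (1+1)*100)]
      exact congrArg String.mk (pvBandEq _ _).symm
    rw [if_neg h1, if_pos (by omega : (0:Int) ≤ level),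
      (PySem.Int.floordiv_eq_iff_of_pos (by norm_num)).mpr (by omega : (0:Int)*100 ≤ level ∧ level < (0+1)*100)]
    exact congrArg String.mk (pvBandEq _ _).symm

-- ===== VERDICT (by name: the statement is the Claim_ definition above) =====
theorem get_prestige_color_spec : Claim_equal_get_prestige_color := by
  intro level _
  unfold Spec_get_prestige_color
  exact main_thm level
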